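-- pv_equiv track=rewrite | github.com/champi-dev/think_ai | think_ai_linter_v2.py | _ends_block
-- ===== SOURCE A (Python) =====
-- def _ends_block(line: str) -> bool:
--     """Check if line ends a block"""
--     end_keywords = ["return", "break", "continue", "pass", "raise"]
--     for keyword in end_keywords:
--         if line.startswith(keyword) and (
--             len(line) == len(keyword) or line[len(keyword)] in " (#"
--         ):
--             return True
--     return False
-- ===== SOURCE B (Python) =====
-- def _ends_block(line: str) -> bool:
--     """Check if line ends a block"""
--     token = []
--     for c in line:
--         if c in " (#":
--             break
--         token.append(c)
--     return "".join(token) in {"return", "break", "continue", "pass", "raise"}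
-- ===== Notes on version B (the rewrite author's own statement) =====
-- stated objective: simpler
-- what changed: B extracts the leading token (characters before the first space, open-paren or hash delimiter) once and tests it for set membership, replacing A's per-keyword startswith + boundary-index arithmetic loop.
import Mathlib
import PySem

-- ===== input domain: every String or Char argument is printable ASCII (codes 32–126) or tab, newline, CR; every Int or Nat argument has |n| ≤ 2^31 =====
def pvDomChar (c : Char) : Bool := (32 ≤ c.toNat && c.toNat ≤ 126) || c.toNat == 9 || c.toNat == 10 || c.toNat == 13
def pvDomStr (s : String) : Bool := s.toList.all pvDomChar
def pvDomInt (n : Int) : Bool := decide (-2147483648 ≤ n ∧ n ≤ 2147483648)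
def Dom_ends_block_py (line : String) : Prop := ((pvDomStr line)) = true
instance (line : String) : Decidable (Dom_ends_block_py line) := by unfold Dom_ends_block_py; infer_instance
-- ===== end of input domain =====

-- B extracts the leading token (chars before the first space/open-paren/hash delimiter) once and tests set membership,
-- replacing A's per-keyword startswith + boundary-index loop; objective: simpler.


-- ===== PORT A =====
def endKeywords : List String := ["return", "break", "continue", "pass", "raise"]

-- per-keyword test of A's loop body: startswith and (len equal or boundary char in " (#")
-- c in " (#"  (the delimiter test both Pythons write literally)
def bDelim (c : Char) : Bool := c == ' ' || c == '(' || c == '#'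

def aCond (line kw : String) : Bool :=
  PySem.Str.startswith line kw &&
    (PySem.Str.len line == PySem.Str.len kw ||
      (match PySem.Str.pyGet? line (PySem.Str.len kw) with
       | some c => bDelim c
       | none => false))

def ends_block_py (line : String) : Bool :=
  endKeywords.any (fun kw => aCond line kw)

-- ===== PORT B =====
-- token = chars of line before the first delimiter; then membership in the keyword set
def ends_block_py_alt (line : String) : Bool :=
  let token := line.toList.takeWhile (fun c => !bDelim c)
  ["return", "break", "continue", "pass", "raise"].any (fun kw => token == kw.toList)

-- ===== PRECONDITION & SPEC =====
def Spec_ends_block_py (line : String) (out : Bool) : Prop := out = ends_block_py_alt line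
instance (line : String) (out : Bool) : Decidable (Spec_ends_block_py line out) := by unfold Spec_ends_block_py; infer_instance

-- ===== CLAIM (what is proved, stated in full; the proofs are below) =====
def Claim_equal_ends_block_py : Prop := ∀ (line : String), Dom_ends_block_py line → Spec_ends_block_py line (ends_block_py line)

-- ===== LEMMAS AND PROOFS =====

-- A's per-keyword condition, on char lists, equals "the leading token is exactly k",
-- provided k contains no delimiter characters.
theorem cond_eq_takeWhile (k : List Char) (hk : ∀ c ∈ k, bDelim c = false) :
    ∀ l : List Char,
      (k.isPrefixOf l &&
        ((l.length == k.length) ||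
          (match l[k.length]? with
           | some c => bDelim c
           | none => false))) = (l.takeWhile (fun c => !bDelim c) == k) := by
  induction k with
  | nil =>
      intro l
      cases l with
      | nil => decide
      | cons c t =>
          simp [List.takeWhile]
          cases h : bDelim c <;> simp
  | cons a k' ih =>
      intro l
      have ha : bDelim a = false := hk a (by simp)
      have hk' : ∀ c ∈ k', bDelim c = false := fun c hc => hk c (by simp [hc])
      cases l with
      | nil => simp [List.isPrefixOf]
      | cons c t =>
          by_cases hca : c = a
          · subst hca
            have := ih hk' t
            simp [List.isPrefixOf, List.takeWhile, ha, this]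
          · have hne : (c == a) = false := by simp [hca]
            have hac : (a == c) = false := by
              rw [beq_eq_false_iff_ne]; exact fun h' => hca h'.symm
            simp [List.isPrefixOf, List.takeWhile]
            cases h : bDelim c <;> simp [hne, hac]

-- A's per-keyword condition at String level, bridged to char lists.
theorem aCond_eq (kw : String) (hk : ∀ c ∈ kw.toList, bDelim c = false) (line : String) :
    aCond line kw = (line.toList.takeWhile (fun c => !bDelim c) == kw.toList) := by
  have h := cond_eq_takeWhile kw.toList hk line.toList
  simp only [aCond, PySem.Str.startswith_eq, PySem.Chars.startswith, PySem.Str.len_eq,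
    PySem.Str.pyGet?_eq, PySem.Chars.pyGet?_eq_listPyGet?, PySem.List.pyGet?_natCast]
  rw [show ((line.toList.length : Int) == (kw.toList.length : Int))
        = (line.toList.length == kw.toList.length) from by
      rw [Bool.eq_iff_iff]; simp]
  exact h

-- ===== VERDICT (by name: the statement is the Claim_ definition above) =====
theorem ends_block_py_spec : Claim_equal_ends_block_py := by
  intro line _
  unfold Spec_ends_block_py ends_block_py ends_block_py_alt endKeywords
  simp only [List.any_cons, List.any_nil, Bool.or_false,
    aCond_eq "return" (by simp [bDelim]), aCond_eq "break" (by simp [bDelim]),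
    aCond_eq "continue" (by simp [bDelim]), aCond_eq "pass" (by simp [bDelim]),
    aCond_eq "raise" (by simp [bDelim])]
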